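-- pv_equiv track=rewrite | github.com/MrBrantCode/unitest_baseline | mut_generate/mist_train_taco/taco_12798/solution.py | count_good_substrings
-- ===== SOURCE A (Python) =====
-- def count_good_substrings(A: str) -> int:
--     n = len(A)
--     ans = 0
--     temp = []
--     l = 0
--     count = 1
--     current = A[0]
--     start = 0
--     end = 0
--     i = 1
--
--     while i < n:
--         if A[i] == current:
--             count += 1
--             end += 1
--         else:
--             if count > 0:
--                 temp.append([start, end])
--                 l += 1
--             count = 1
--             current = A[i]
--             start = i
--             end = i
--         i += 1
--
--     if count > 0:
--         temp.append([start, end])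
--         l += 1
--
--     for i in range(l):
--         le = temp[i][1] - temp[i][0] + 1
--         if le >= 2:
--             val = le * (le - 1) // 2
--             ans += val
--         x = temp[i][0] - 1
--         y = temp[i][1] + 1
--         if x >= 0 and y < n and (A[x] == A[y]):
--             ans += 1
--
--     return ans
-- ===== SOURCE B (Python) =====
-- def count_good_substrings(A: str) -> int:
--     ans = 0
--     prev = None
--     cur = A[0]
--     cnt = 1
--     for c in A[1:]:
--         if c == cur:
--             cnt += 1
--         else:
--             ans += cnt * (cnt - 1) // 2
--             if prev is not None and prev == c:
--                 ans += 1
--             prev = cur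
--             cur = c
--             cnt = 1
--     ans += cnt * (cnt - 1) // 2
--     return ans
-- ===== Notes on version B (the rewrite author's own statement) =====
-- stated objective: faster
-- what changed: B replaces A's two sequential passes (collect [start,end] run pairs into a list, then re-scan that list with index arithmetic and character lookups) by a single linear scan that closes each run inline, adding len*(len-1)//2 and checking the flanking-character bonus against the remembered previous run's character; Pre_ only excludes the empty string, on which both A and B raise IndexError at A[0].
import Mathlib
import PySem

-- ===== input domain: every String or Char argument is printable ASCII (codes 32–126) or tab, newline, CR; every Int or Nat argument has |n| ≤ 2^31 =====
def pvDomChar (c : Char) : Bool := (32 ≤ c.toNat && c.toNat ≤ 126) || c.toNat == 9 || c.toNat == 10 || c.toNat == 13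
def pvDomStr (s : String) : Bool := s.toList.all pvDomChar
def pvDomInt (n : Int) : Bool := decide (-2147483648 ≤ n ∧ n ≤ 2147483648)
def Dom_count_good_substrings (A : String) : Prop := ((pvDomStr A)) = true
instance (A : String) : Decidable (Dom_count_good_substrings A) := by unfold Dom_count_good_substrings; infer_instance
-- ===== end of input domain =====

-- B is a single scan that closes runs inline, instead of A's two passes over a stored run table; return value only, Pre_ excludes "" (IndexError in both).

-- ===== PORT A =====
-- A's while loop: collects [start,end] run pairs into temp, returns (temp, count, start, end)
def aLoop : List Char → Int → List (Int × Int) → Int → Char → Int → Int →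
    (List (Int × Int) × Int × Int × Int)
  | [], _, temp, count, _, start, e => (temp, count, start, e)
  | c :: rs, i, temp, count, current, start, e =>
    if c == current then aLoop rs (i + 1) temp (count + 1) current start (e + 1)
    else aLoop rs (i + 1) (if count > 0 then temp ++ [(start, e)] else temp) 1 c i i

-- A's second loop body (one iteration of 'for i in range(l)')
def aStep (chars : List Char) (n : Int) (ans : Int) (p : Int × Int) : Int :=
  let le := p.2 - p.1 + 1
  let ans := if le ≥ 2 then ans + PySem.Int.floordiv (le * (le - 1)) 2 else ans
  let x := p.1 - 1
  let y := p.2 + 1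
  if x ≥ 0 ∧ y < n ∧ PySem.List.pyGet? chars x = PySem.List.pyGet? chars y then ans + 1 else ans

def count_good_substrings (A : String) : Int :=
  match A.toList with
  | [] => 0  -- A[0] raises IndexError here; excluded by Pre_
  | c0 :: rest =>
    let chars := c0 :: rest
    let n : Int := (chars.length : Int)
    let r := aLoop rest 1 [] 1 c0 0 0
    let temp := if r.2.1 > 0 then r.1 ++ [(r.2.2.1, r.2.2.2)] else r.1
    temp.foldl (aStep chars n) 0

-- ===== PORT B =====
-- B's single scan: prev = previous run's char (None before the second run), cur/cnt = current run
def bLoop : List Char → Option Char → Char → Int → Int → Int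
  | [], _, _, cnt, ans => ans + PySem.Int.floordiv (cnt * (cnt - 1)) 2
  | c :: rs, prev, cur, cnt, ans =>
    if c == cur then bLoop rs prev cur (cnt + 1) ans
    else
      bLoop rs (some cur) c 1
        (ans + PySem.Int.floordiv (cnt * (cnt - 1)) 2 + (if prev == some c then 1 else 0))

def count_good_substrings_alt (A : String) : Int :=
  match A.toList with
  | [] => 0  -- cur = A[0] raises IndexError here; excluded by Pre_
  | c0 :: rest => bLoop rest none c0 1 0

-- ===== PRECONDITION & SPEC =====
-- Pre_ excludes only the empty string, on which A (and B) raise IndexError at A[0].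
def Pre_count_good_substrings (A : String) : Prop := A ≠ ""
instance (A : String) : Decidable (Pre_count_good_substrings A) := by
  unfold Pre_count_good_substrings; infer_instance

def pvWitness_count_good_substrings : String := "aabaa"

def Spec_count_good_substrings (A : String) (out : Int) : Prop := out = count_good_substrings_alt A
instance (A : String) (out : Int) : Decidable (Spec_count_good_substrings A out) := by unfold Spec_count_good_substrings; infer_instance

-- ===== CLAIM (what is proved, stated in full; the proofs are below) =====
def Claim_equal_count_good_substrings : Prop := ∀ (A : String), Dom_count_good_substrings A → Pre_count_good_substrings A → Spec_count_good_substrings A (count_good_substrings A)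

-- ===== LEMMAS AND PROOFS =====

-- for count ≥ 1 the 'le ≥ 2' guard is redundant: at count = 1 the added term is 0
lemma fd_guard (a count : Int) (h : 1 ≤ count) :
    (if count ≥ 2 then a + PySem.Int.floordiv (count * (count - 1)) 2 else a)
      = a + PySem.Int.floordiv (count * (count - 1)) 2 := by
  rcases lt_or_ge count 2 with h2 | h2
  · have : count = 1 := by omega
    subst this; norm_num
  · simp [h2]

lemma pyGet_append (taken : List Char) (c : Char) (rs : List Char) :
    PySem.List.pyGet? (taken ++ c :: rs) ((taken.length : Int)) = some c := by
  rw [PySem.List.pyGet?_natCast]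
  simp

-- main invariant: A's remaining loop + final flush + second pass equals B's remaining scan
lemma key (chars : List Char) :
    ∀ (rest taken : List Char) (temp : List (Int × Int)) (count start e ans : Int)
      (prev : Option Char) (current : Char),
      chars = taken ++ rest →
      1 ≤ (taken.length : Int) →
      e = (taken.length : Int) - 1 →
      count = e - start + 1 →
      0 ≤ start → start ≤ e →
      PySem.List.pyGet? chars e = some current →
      ((start = 0 ∧ prev = none) ∨ (1 ≤ start ∧ PySem.List.pyGet? chars (start - 1) = prev)) →
      temp.foldl (aStep chars (chars.length : Int)) 0 = ans →
      (let r := aLoop rest (taken.length : Int) temp count current start e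
       (if r.2.1 > 0 then r.1 ++ [(r.2.2.1, r.2.2.2)] else r.1).foldl
          (aStep chars (chars.length : Int)) 0)
        = bLoop rest prev current count ans := by
  intro rest
  induction rest with
  | nil =>
    intro taken temp count start e ans prev current hch hi he hc hs0 hse hcur hprev hacc
    simp only [aLoop, bLoop]
    have hcount : count > 0 := by omega
    simp only [hcount, if_pos, List.foldl_append, hacc, List.foldl_cons, List.foldl_nil]
    have hy : ¬ (e + 1 < (chars.length : Int)) := by
      subst hch; simp only [List.append_nil] at *; omega
    simp only [aStep]
    rw [show e - start + 1 = count by omega, fd_guard _ _ (by omega)]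
    simp only [hy, false_and, and_false, if_false]
  | cons c rs ih =>
    intro taken temp count start e ans prev current hch hi he hc hs0 hse hcur hprev hacc
    simp only [aLoop, bLoop]
    by_cases hcc : c = current
    · simp only [hcc, beq_self_eq_true, if_true]
      have h1 : chars = (taken ++ [c]) ++ rs := by simp [hch]
      have h2 : ((taken ++ [c]).length : Int) = (taken.length : Int) + 1 := by simp
      have := ih (taken ++ [c]) temp (count + 1) start (e + 1) ans prev current
        h1 (by omega) (by omega) (by omega) hs0 (by omega)
        (by rw [show e + 1 = ((taken.length : Int)) by omega, hch, hcc]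
            exact pyGet_append taken current rs)
        hprev hacc
      rw [h2] at this
      exact this
    · have hbeq : (c == current) = false := by simp [hcc]
      simp only [hbeq]
      have hcount : count > 0 := by omega
      simp only [hcount, if_pos]
      have h1 : chars = (taken ++ [c]) ++ rs := by simp [hch]
      have h2 : ((taken ++ [c]).length : Int) = (taken.length : Int) + 1 := by simp
      have hn : (chars.length : Int) = (taken.length : Int) + 1 + rs.length := by
        rw [hch]; push_cast [List.length_append, List.length_cons]; ring
      have hgc : PySem.List.pyGet? chars ((taken.length : Int)) = some c := by
        rw [hch]; exact pyGet_append taken c rs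
      -- the new accumulator equality: folding the freshly closed run
      have hacc' : (temp ++ [(start, e)]).foldl (aStep chars (chars.length : Int)) 0
          = ans + PySem.Int.floordiv (count * (count - 1)) 2
              + (if prev == some c then 1 else 0) := by
        rw [List.foldl_append, hacc, List.foldl_cons, List.foldl_nil]
        simp only [aStep]
        rw [show e - start + 1 = count by omega, fd_guard _ _ (by omega)]
        have hy : e + 1 < (chars.length : Int) := by omega
        have hye : PySem.List.pyGet? chars (e + 1) = some c := by
          rw [show e + 1 = ((taken.length : Int)) by omega]; exact hgc
        rcases hprev with ⟨hstart, hpnone⟩ | ⟨hstart, hpget⟩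
        · subst hpnone hstart
          norm_num
        · by_cases hpc : prev = some c
          · rw [if_pos ⟨by omega, hy, by rw [hpget, hye, hpc]⟩]
            simp [hpc]
          · rw [if_neg (by rintro ⟨-, -, hq⟩; rw [hpget, hye] at hq; exact hpc hq)]
            have hb : (prev == some c) = false := by simp [hpc]
            simp [hb]
      have := ih (taken ++ [c]) (temp ++ [(start, e)]) 1 (taken.length : Int)
        (taken.length : Int)
        (ans + PySem.Int.floordiv (count * (count - 1)) 2 + (if prev == some c then 1 else 0))
        (some current) c
        h1 (by omega) (by omega) (by omega) (by omega) (le_refl _)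
        hgc
        (Or.inr ⟨by omega, by rw [show (taken.length : Int) - 1 = e by omega]; exact hcur⟩)
        hacc'
      rw [h2] at this
      exact this

-- ===== VERDICT (by name: the statement is the Claim_ definition above) =====
theorem count_good_substrings_spec : Claim_equal_count_good_substrings := by
  intro A _ hpre
  unfold Spec_count_good_substrings count_good_substrings count_good_substrings_alt
  have hne : A.toList ≠ [] := by
    intro h
    exact hpre (by simpa using h)
  cases hch : A.toList with
  | nil => exact absurd hch hne
  | cons c0 rest =>
    simp only
    exact key (c0 :: rest) rest [c0] [] 1 0 0 0 none c0
      (by simp) (by simp) (by simp) (by ring) le_rfl le_rfl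
      (by exact pyGet_append [] c0 rest)
      (Or.inl ⟨rfl, rfl⟩) rfl
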